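-- pv_equiv track=rewrite | github.com/stachwk/dbfs | tests/integration/test_rust_hotpath_copy_pack.py | python_pack_changed_ranges
-- ===== SOURCE A (Python) =====
-- def python_pack_changed_ranges(
--     off_out: int,
--     total_len: int,
--     block_size: int,
--     changed_mask: list[bool],
-- ):
--     block_size = max(1, int(block_size))
--     ranges = []
--     run_start = None
--     copy_end = off_out + total_len
--
--     for block_index, changed in enumerate(changed_mask):
--         block_start = off_out + block_index * block_size
--         if changed:
--             if run_start is None:
--                 run_start = block_start
--             continue
--
--         if run_start is not None:
--             ranges.append((run_start, block_start))
--             run_start = None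
--
--     if run_start is not None:
--         ranges.append((run_start, copy_end))
--
--     return ranges
-- ===== SOURCE B (Python) =====
-- def python_pack_changed_ranges(
--     off_out: int,
--     total_len: int,
--     block_size: int,
--     changed_mask: list[bool],
-- ):
--     # Edge detection over a padded mask: rising edges give run starts, falling
--     # edges give run ends; zip pairs them up. No stateful scan.
--     block_size = max(1, int(block_size))
--     copy_end = off_out + total_len
--     n = len(changed_mask)
--     pad = [False] + changed_mask + [False]
--     starts = [i for i, (a, b) in enumerate(zip(pad, pad[1:])) if b and not a]
--     ends = [i + 1 for i, (b, c) in enumerate(zip(pad[1:], pad[2:])) if b and not c]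
--     return [
--         (off_out + s * block_size,
--          copy_end if e == n else off_out + e * block_size)
--         for s, e in zip(starts, ends)
--     ]
-- ===== Notes on version B (the rewrite author's own statement) =====
-- stated objective: alternative
-- what changed: Replaces A's stateful run-tracking scan (run_start variable, close-on-false, trailing close) with edge detection over a padded mask: rising edges of zip(pad,pad[1:]) give run starts, falling edges of zip(pad[1:],pad[2:]) give run ends, and zip pairs them; no mutable scan state at all.
import Mathlib
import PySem

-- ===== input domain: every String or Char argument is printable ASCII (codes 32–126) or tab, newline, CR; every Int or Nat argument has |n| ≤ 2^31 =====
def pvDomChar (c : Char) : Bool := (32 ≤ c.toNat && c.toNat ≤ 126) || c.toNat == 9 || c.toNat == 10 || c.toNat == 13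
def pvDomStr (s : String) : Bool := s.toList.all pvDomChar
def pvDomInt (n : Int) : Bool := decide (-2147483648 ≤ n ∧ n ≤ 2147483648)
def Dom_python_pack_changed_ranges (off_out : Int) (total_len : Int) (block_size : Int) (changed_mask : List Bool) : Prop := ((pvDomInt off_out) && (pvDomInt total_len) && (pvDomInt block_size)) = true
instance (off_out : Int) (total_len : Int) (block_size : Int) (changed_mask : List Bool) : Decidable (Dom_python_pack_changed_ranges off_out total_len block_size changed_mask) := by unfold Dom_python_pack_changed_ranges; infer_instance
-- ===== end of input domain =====

-- B replaces A's stateful run-tracking scan by edge detection over a padded mask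
-- (rising edges = starts, falling edges = ends, zipped into ranges); objective: alternative, same cost.

-- ===== PORT A =====
-- one loop iteration of A: state (ranges, run_start), element (block_index, changed)
def pvAStep (off_out bs : Int) (st : List (Int × Int) × Option Int) (p : Int × Bool) : List (Int × Int) × Option Int :=
  let block_start := off_out + p.1 * bs
  if p.2 then
    match st.2 with
    | none => (st.1, some block_start)
    | some _ => st
  else
    match st.2 with
    | some rs => (st.1 ++ [(rs, block_start)], none)
    | none => st

-- the trailing 'if run_start is not None' close
def pvAFin (copy_end : Int) (st : List (Int × Int) × Option Int) : List (Int × Int) :=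
  match st.2 with
  | some rs => st.1 ++ [(rs, copy_end)]
  | none => st.1

def python_pack_changed_ranges (off_out : Int) (total_len : Int) (block_size : Int) (changed_mask : List Bool) : List (Int × Int) :=
  let bs := max 1 block_size
  let copy_end := off_out + total_len
  pvAFin copy_end ((PySem.List.enumerate changed_mask 0).foldl (pvAStep off_out bs) ([], none))

-- ===== PORT B =====
-- comprehension predicates: rising edge (start index), falling edge (end index)
def pvStartPred (p : Int × (Bool × Bool)) : Option Int :=
  if p.2.2 && !p.2.1 then some p.1 else none
def pvEndPred (p : Int × (Bool × Bool)) : Option Int :=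
  if p.2.1 && !p.2.2 then some (p.1 + 1) else none

def python_pack_changed_ranges_alt (off_out : Int) (total_len : Int) (block_size : Int) (changed_mask : List Bool) : List (Int × Int) :=
  let bs := max 1 block_size
  let copy_end := off_out + total_len
  let n : Int := changed_mask.length
  let pad := false :: changed_mask ++ [false]
  let starts := (PySem.List.enumerate (pad.zip (pad.drop 1)) 0).filterMap pvStartPred
  let ends := (PySem.List.enumerate ((pad.drop 1).zip (pad.drop 2)) 0).filterMap pvEndPred
  (starts.zip ends).map (fun se => (off_out + se.1 * bs, if se.2 = n then copy_end else off_out + se.2 * bs))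

-- ===== PRECONDITION & SPEC =====
def Spec_python_pack_changed_ranges (off_out : Int) (total_len : Int) (block_size : Int) (changed_mask : List Bool) (out : List (Int × Int)) : Prop := out = python_pack_changed_ranges_alt off_out total_len block_size changed_mask
instance (off_out : Int) (total_len : Int) (block_size : Int) (changed_mask : List Bool) (out : List (Int × Int)) : Decidable (Spec_python_pack_changed_ranges off_out total_len block_size changed_mask out) := by unfold Spec_python_pack_changed_ranges; infer_instance

-- ===== CLAIM (what is proved, stated in full; the proofs are below) =====
def Claim_equal_python_pack_changed_ranges : Prop := ∀ (off_out : Int) (total_len : Int) (block_size : Int) (changed_mask : List Bool), Dom_python_pack_changed_ranges off_out total_len block_size changed_mask → Spec_python_pack_changed_ranges off_out total_len block_size changed_mask (python_pack_changed_ranges off_out total_len block_size changed_mask)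

-- ===== LEMMAS AND PROOFS =====

-- reference: the list of runs of the mask as (start index, end index) pairs,
-- with a pending run start and current index; the final run ends at the mask length
def pvPairs : List Bool → Option Int → Int → List (Int × Int)
  | [], none, _ => []
  | [], some s, i => [(s, i)]
  | c :: rest, none, i => if c then pvPairs rest (some i) (i + 1) else pvPairs rest none (i + 1)
  | c :: rest, some s, i => if c then pvPairs rest (some s) (i + 1) else (s, i) :: pvPairs rest none (i + 1)

-- recursive forms of B's start/end comprehensions
def pvSF : Bool → List Bool → Int → List Int
  | _, [], _ => []
  | prev, c :: rest, i => (if c && !prev then [i] else []) ++ pvSF c rest (i + 1)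

def pvEF : List Bool → Int → List Int
  | [], _ => []
  | c :: rest, i => (if c && !(rest.headD false) then [i + 1] else []) ++ pvEF rest (i + 1)

theorem pvSBridge : ∀ (mask : List Bool) (prev : Bool) (i : Int),
    (PySem.List.enumerate ((prev :: (mask ++ [false])).zip (mask ++ [false])) i).filterMap pvStartPred
      = pvSF prev mask i := by
  intro mask
  induction mask with
  | nil =>
    intro prev i
    simp [PySem.List.enumerate, pvStartPred, pvSF]
  | cons c rest ih =>
    intro prev i
    simp only [List.cons_append, List.zip_cons_cons, PySem.List.enumerate_cons,
      List.filterMap_cons]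
    rw [ih c (i + 1)]
    cases c <;> cases prev <;> simp [pvStartPred, pvSF]

theorem pvEBridge : ∀ (mask : List Bool) (i : Int),
    (PySem.List.enumerate ((mask ++ [false]).zip ((mask ++ [false]).drop 1)) i).filterMap pvEndPred
      = pvEF mask i := by
  intro mask
  induction mask with
  | nil =>
    intro i
    simp [PySem.List.enumerate, pvEndPred, pvEF]
  | cons c rest ih =>
    intro i
    cases rest with
    | nil =>
      cases c <;> simp [PySem.List.enumerate_cons, pvEndPred, pvEF]
    | cons h t =>
      have := ih (i + 1)
      simp only [List.cons_append, List.drop_succ_cons, List.drop_zero] at this ⊢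
      simp only [List.zip_cons_cons, PySem.List.enumerate_cons, List.filterMap_cons]
      rw [this]
      cases c <;> cases h <;> simp [pvEndPred, pvEF]

-- simultaneous invariant: zipping starts with ends yields the run pairs
theorem pvZipSE : ∀ (mask : List Bool) (i : Int),
    ((pvSF false mask i).zip (pvEF mask i) = pvPairs mask none i) ∧
    (∀ s : Int, ((s :: pvSF true mask i).zip
        ((if !(mask.headD false) then [i] else []) ++ pvEF mask i)) = pvPairs mask (some s) i) := by
  intro mask
  induction mask with
  | nil =>
    intro i
    constructor
    · simp [pvSF, pvEF, pvPairs]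
    · intro s; simp [pvSF, pvEF, pvPairs]
  | cons c rest ih =>
    intro i
    constructor
    · cases c with
      | false =>
        simpa [pvSF, pvEF, pvPairs] using (ih (i + 1)).1
      | true =>
        have h2 := (ih (i + 1)).2 i
        simpa [pvSF, pvEF, pvPairs] using h2
    · intro s
      cases c with
      | false =>
        have h1 := (ih (i + 1)).1
        simpa [pvSF, pvEF, pvPairs] using h1
      | true =>
        have h2 := (ih (i + 1)).2 s
        simpa [pvSF, pvEF, pvPairs] using h2

-- A's fold computes the mapped run pairs
theorem pvALem (off bs copy_end nI : Int) :
    ∀ (rest : List Bool) (i : Int) (acc : List (Int × Int)) (pend : Option Int),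
      i + (rest.length : Int) = nI →
      pvAFin copy_end ((PySem.List.enumerate rest i).foldl (pvAStep off bs)
          (acc, pend.map (fun s => off + s * bs)))
        = acc ++ (pvPairs rest pend i).map
            (fun se => (off + se.1 * bs, if se.2 = nI then copy_end else off + se.2 * bs)) := by
  intro rest
  induction rest with
  | nil =>
    intro i acc pend hm
    simp only [List.length_nil, Int.natCast_zero, add_zero] at hm
    cases pend with
    | none => simp [PySem.List.enumerate, pvAFin, pvPairs]
    | some s => simp [PySem.List.enumerate, pvAFin, pvPairs, hm]
  | cons c rest ih =>
    intro i acc pend hm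
    simp only [List.length_cons] at hm
    rw [PySem.List.enumerate_cons, List.foldl_cons]
    cases c with
    | true =>
      cases pend with
      | none =>
        have hst : pvAStep off bs (acc, Option.map (fun s => off + s * bs) none) (i, true)
            = (acc, Option.map (fun s => off + s * bs) (some i)) := by
          simp [pvAStep]
        rw [hst, ih (i + 1) acc (some i) (by simp only [Int.natCast_add, Int.natCast_one] at hm ⊢; omega)]
        simp [pvPairs]
      | some s =>
        have hst : pvAStep off bs (acc, Option.map (fun s => off + s * bs) (some s)) (i, true)
            = (acc, Option.map (fun s => off + s * bs) (some s)) := by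
          simp [pvAStep]
        rw [hst, ih (i + 1) acc (some s) (by simp only [Int.natCast_add, Int.natCast_one] at hm ⊢; omega)]
        simp [pvPairs]
    | false =>
      cases pend with
      | none =>
        have hst : pvAStep off bs (acc, Option.map (fun s => off + s * bs) none) (i, false)
            = (acc, Option.map (fun s => off + s * bs) none) := by
          simp [pvAStep]
        rw [hst, ih (i + 1) acc none (by simp only [Int.natCast_add, Int.natCast_one] at hm ⊢; omega)]
        simp [pvPairs]
      | some s =>
        have hst : pvAStep off bs (acc, Option.map (fun s => off + s * bs) (some s)) (i, false)
            = (acc ++ [(off + s * bs, off + i * bs)], Option.map (fun s => off + s * bs) none) := by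
          simp [pvAStep]
        rw [hst, ih (i + 1) (acc ++ [(off + s * bs, off + i * bs)]) none (by simp only [Int.natCast_add, Int.natCast_one] at hm ⊢; omega)]
        have hne : ¬ (i = nI) := by
          have : (0 : Int) ≤ (rest.length : Int) := Int.natCast_nonneg _
          omega
        simp [pvPairs, hne]

-- ===== VERDICT (by name: the statement is the Claim_ definition above) =====
theorem python_pack_changed_ranges_spec : Claim_equal_python_pack_changed_ranges := by
  intro off_out total_len block_size mask _
  unfold Spec_python_pack_changed_ranges
  unfold python_pack_changed_ranges python_pack_changed_ranges_alt
  simp only [List.cons_append]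
  have hA := pvALem off_out (max 1 block_size) (off_out + total_len) (mask.length : Int)
    mask 0 [] none (by simp)
  simp only [Option.map_none] at hA
  rw [hA]
  have hdrop1 : (false :: (mask ++ [false])).drop 1 = mask ++ [false] := rfl
  have hdrop2 : (false :: (mask ++ [false])).drop 2 = (mask ++ [false]).drop 1 := rfl
  rw [hdrop1, hdrop2, pvSBridge mask false 0, pvEBridge mask 0, (pvZipSE mask 0).1]
  simp
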